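-- pv_equiv track=rewrite | github.com/tomirevc/AlgoritmosEvolutivosLaboratorios | Semana4_AE/ejercicio02_MentorAvailability.py | contar_choques
-- ===== SOURCE A (Python) =====
-- def contar_choques(asignacion):
--     conteo = {}
--     for i, slot in enumerate(asignacion):
--         if slot not in conteo:
--             conteo[slot] = 1
--         else:
--             conteo[slot] += 1
--     # Sumar cuántos mentores extras hay por cada horario (eso son los choques)
--     choques = sum(v - 1 for v in conteo.values() if v > 1)
--     return choques
-- ===== SOURCE B (Python) =====
-- def contar_choques(asignacion):
--     # Collisions = total assignments minus number of distinct slots.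
--     xs = list(asignacion)
--     return len(xs) - len(set(xs))
-- ===== Notes on version B (the rewrite author's own statement) =====
-- stated objective: simpler
-- what changed: Replaces the tally dict and the sum of (v-1) over overloaded slots by the closed-form identity collisions = len(xs) - len(set(xs)); one set construction instead of a per-element dict branch plus a generator sum.
import Mathlib
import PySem

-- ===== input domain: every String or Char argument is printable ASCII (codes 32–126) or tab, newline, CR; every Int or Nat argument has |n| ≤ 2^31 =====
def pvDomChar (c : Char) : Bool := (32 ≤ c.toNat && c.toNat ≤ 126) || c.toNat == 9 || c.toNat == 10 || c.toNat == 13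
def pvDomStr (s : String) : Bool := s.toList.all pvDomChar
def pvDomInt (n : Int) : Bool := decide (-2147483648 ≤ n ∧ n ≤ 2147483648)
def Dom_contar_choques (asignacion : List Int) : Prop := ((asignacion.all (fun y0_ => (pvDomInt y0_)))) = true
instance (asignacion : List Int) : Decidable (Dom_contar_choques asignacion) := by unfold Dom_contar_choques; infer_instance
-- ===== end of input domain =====

-- B computes collisions by the closed form len(xs) - len(set(xs)) instead of A's tally dict; objective: simpler.
-- ===== PORT A =====
def contar_choques (asignacion : List Int) : Int :=
  let conteo : PySem.Dict Int Int :=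
    asignacion.foldl
      (fun conteo slot =>
        if ¬ conteo.contains slot then conteo.insert slot 1
        else conteo.modify slot 0 (· + 1))
      PySem.Dict.empty
  ((conteo.values.filter (fun v => 1 < v)).map (fun v => v - 1)).sum

-- ===== PORT B =====
def contar_choques_alt (asignacion : List Int) : Int :=
  let xs := asignacion
  (xs.length : Int) - ((PySem.Set.ofList xs).length : Int)

-- ===== PRECONDITION & SPEC =====
def Spec_contar_choques (asignacion : List Int) (out : Int) : Prop := out = contar_choques_alt asignacion
instance (asignacion : List Int) (out : Int) : Decidable (Spec_contar_choques asignacion out) := by unfold Spec_contar_choques; infer_instance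

-- ===== CLAIM (what is proved, stated in full; the proofs are below) =====
def Claim_equal_contar_choques : Prop := ∀ (asignacion : List Int), Dom_contar_choques asignacion → Spec_contar_choques asignacion (contar_choques asignacion)

-- ===== LEMMAS AND PROOFS =====

-- ===== VERDICT (by name: the statement is the Claim_ definition above) =====
-- A's branching update is exactly Counter's update
lemma step_eq_counter_step (d : PySem.Dict Int Int) (slot : Int) :
    (if ¬ d.contains slot then d.insert slot 1 else d.modify slot 0 (· + 1))
      = d.modify slot 0 (· + 1) := by
  by_cases h : d.contains slot
  · simp [h]
  · rw [if_pos (by simpa using h), PySem.Dict.modify,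
        PySem.Dict.getD_of_not_contains d (0:Int) (by simpa using h)]
    norm_num

-- sum of (v-1) over the v>1 entries, when every entry is ≥ 1
lemma sum_excess (vs : List Int) (h : ∀ v ∈ vs, 1 ≤ v) :
    ((vs.filter (fun v => 1 < v)).map (fun v => v - 1)).sum
      = vs.sum - vs.length := by
  induction vs with
  | nil => simp
  | cons v vs ih =>
    have hv : 1 ≤ v := h v (by simp)
    have ih' := ih (fun w hw => h w (by simp [hw]))
    by_cases hlt : 1 < v
    · simp [hlt, ih']; ring
    · have : v = 1 := le_antisymm (by omega) hv
      subst this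
      simp [ih']; ring

lemma sum_counts (xs : List Int) :
    ((PySem.Set.ofList xs).map (fun k => (xs.count k : Int))).sum
      = (xs.length : Int) := by
  have hperm : (PySem.Set.ofList xs).Perm xs.dedup :=
    (List.perm_ext_iff_of_nodup (PySem.Set.nodup_ofList xs) xs.nodup_dedup).2
      (by intro a; simp [PySem.Set.mem_ofList, List.mem_dedup])
  rw [(hperm.map _).sum_eq]
  rw [show (fun k : Int => (xs.count k : Int)) = (fun n : Nat => (n : Int)) ∘ (fun k => xs.count k) from rfl]
  rw [← List.map_map]
  rw [← Nat.cast_list_sum, List.sum_map_count_dedup_eq_length]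

theorem contar_choques_spec : Claim_equal_contar_choques := by
  intro xs _
  unfold Spec_contar_choques contar_choques contar_choques_alt
  simp only [funext₂ step_eq_counter_step]
  have hd : xs.foldl (fun d slot => d.modify slot 0 (· + 1)) PySem.Dict.empty
      = PySem.Dict.counter xs := rfl
  rw [hd]
  have hvals : (PySem.Dict.counter xs).values
      = (PySem.Set.ofList xs).map (fun k => (xs.count k : Int)) := by
    show (PySem.Dict.counter xs).items.map (·.2) = _
    rw [PySem.Dict.items_counter]
    simp [List.map_map]
  rw [hvals, sum_excess _ (by
    intro v hv
    simp only [List.mem_map] at hv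
    obtain ⟨k, hk, rfl⟩ := hv
    have : 0 < xs.count k := List.count_pos_iff.2 ((PySem.Set.mem_ofList xs k).1 hk)
    exact_mod_cast this)]
  rw [sum_counts, List.length_map]
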